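-- pv_equiv track=rewrite | github.com/ozkayas/leetcode_solutions | 9999-A2Z-OA/Find Requests in Queue.py | findRequestsInQueue
-- ===== SOURCE A (Python) =====
-- import heapq
-- from typing import List
--
-- def findRequestsInQueue(wait:List[int]) -> List[int]:
--     minHeap = []
--     heapq.heapify(minHeap)   ## Will hold tuples (value, index) to check versus lazy removed set
--     ans = [len(wait)]
--     lazy_removed = set() ## Will hold removed indexes lazily
--     removedCount = 0
--
--     #Fill heap:
--     for i, jobTime in enumerate(wait):
--         heapq.heappush(minHeap, (jobTime, i))
--
--     for i in range(len(wait)):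
--
--         # STEP 1: lazy remove the first job
--         if i in lazy_removed: # This may be expired long time ago, then just continue this index
--             continue
--         lazy_removed.add(i)
--         removedCount += 1
--
--         # STEP 2: remove all expired jobs:
--         # at t = 1 we are at index = 0 , so remove <=t values from heap & from removed if any
--         while removedCount < len(wait) and minHeap[0][0] <= (i+1):
--             t,index = heapq.heappop(minHeap)
--             if index not in lazy_removed:
--                 lazy_removed.add(index)
--                 removedCount += 1
--
--
--         # STEP 3: calculate remainings
--         remaining_jobs = len(wait)-removedCount
--         ans.append(remaining_jobs)
--         if ans[-1] == 0:
--             return ans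
-- ===== SOURCE B (Python) =====
-- from bisect import bisect_right
-- from typing import List
--
-- def findRequestsInQueue(wait: List[int]) -> List[int]:
--     # job i departs at time min(i+1, wait[i]); sort the departure times once and
--     # answer each recorded step with one bisect instead of simulating a heap
--     n = len(wait)
--     leaves = sorted(min(i + 1, w) for i, w in enumerate(wait))
--     ans = [n]
--     last = None
--     for i, w in enumerate(wait):
--         if last is not None and w <= last + 1:
--             continue
--         remaining = n - bisect_right(leaves, i + 1)
--         ans.append(remaining)
--         if remaining == 0:
--             return ans
--         last = i
--     return ans
-- ===== Notes on version B (the rewrite author's own statement) =====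
-- stated objective: simpler
-- what changed: B replaces A's heap + lazy-deletion simulation by computing each job's departure time min(i+1, wait[i]) analytically, sorting these times once, and answering each recorded step with one bisect_right count of the jobs already gone.
-- outside the precondition, e.g. on findRequestsInQueue([]): A returns None, B returns [0]
import Mathlib
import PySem

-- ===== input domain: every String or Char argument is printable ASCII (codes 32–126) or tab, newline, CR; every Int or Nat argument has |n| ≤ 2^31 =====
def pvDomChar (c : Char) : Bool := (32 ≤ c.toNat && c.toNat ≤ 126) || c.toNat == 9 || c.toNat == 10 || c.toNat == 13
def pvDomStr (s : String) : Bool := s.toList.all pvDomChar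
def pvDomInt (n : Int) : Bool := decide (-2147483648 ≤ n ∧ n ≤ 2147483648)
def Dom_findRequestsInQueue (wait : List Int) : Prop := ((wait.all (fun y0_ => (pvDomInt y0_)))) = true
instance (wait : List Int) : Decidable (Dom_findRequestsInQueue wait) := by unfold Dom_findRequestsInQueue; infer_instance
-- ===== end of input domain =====

-- B replaces A's heap + lazy-deletion simulation by the analytic departure time min(i+1, wait[i]):
-- sort the departure times once, then answer each recorded step with one bisect (objective: simpler; a timing run measured B faster).

-- ===== PORT A =====
-- heapq is modelled as an ordered list (ascending lexicographic on (value, index)): heappush = ordered insert,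
-- minHeap[0] = head, heappop = pop head — the observable push/min/pop behaviour of Python's heapq on these tuples.
def heapPush : List (Int × Int) → (Int × Int) → List (Int × Int)
  | [], x => [x]
  | y :: ys, x =>
    if x.1 < y.1 ∨ (x.1 = y.1 ∧ x.2 ≤ y.2) then x :: y :: ys else y :: heapPush ys x

-- the `while removedCount < len(wait) and minHeap[0][0] <= t` loop (STEP 2 of A)
def popExpired (n t : Int) : List (Int × Int) → PySem.Set Int → Int →
    List (Int × Int) × PySem.Set Int × Int
  | heap, rm, c =>
    if c < n then
      match heap with
      | [] => ([], rm, c)   -- here Python would evaluate minHeap[0] on an empty heap (IndexError); unreachable from A's states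
      | (v, idx) :: rest =>
        if v ≤ t then
          if PySem.Set.contains rm idx then popExpired n t rest rm c
          else popExpired n t rest (PySem.Set.add rm idx) (c + 1)
        else ((v, idx) :: rest, rm, c)
    else (heap, rm, c)

-- the `for i in range(len(wait))` loop; fuel = number of remaining iterations; fallthrough (fuel 0) is Python's
-- implicit `return None`, reachable only for empty input (excluded by Pre_)
def aLoop (n : Int) : Nat → Int → List (Int × Int) → PySem.Set Int → Int → List Int → List Int
  | 0, _, _, _, _, ans => ans
  | k + 1, i, heap, rm, c, ans =>
    if PySem.Set.contains rm i then aLoop n k (i + 1) heap rm c ans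
    else
      let rm₂ := PySem.Set.add rm i
      let res := popExpired n (i + 1) heap rm₂ (c + 1)
      let r := n - res.2.2
      let ans₂ := ans ++ [r]
      if PySem.List.pyGet? ans₂ (-1) = some 0 then ans₂
      else aLoop n k (i + 1) res.1 res.2.1 res.2.2 ans₂

def findRequestsInQueue (wait : List Int) : List Int :=
  let minHeap := (PySem.List.enumerate wait 0).foldl (fun h q => heapPush h (q.2, q.1)) []
  aLoop (wait.length : Int) wait.length 0 minHeap PySem.Set.empty 0 [(wait.length : Int)]

-- ===== PORT B =====
def altLoop (n : Int) (leaves : List Int) : Option Int → List Int → List (Int × Int) → List Int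
  | _, ans, [] => ans
  | last, ans, (i, w) :: rest =>
    if (match last with | some l => decide (w ≤ l + 1) | none => false) then
      altLoop n leaves last ans rest
    else
      let r : Int := n - (PySem.List.bisectRight leaves (i + 1) : Nat)
      let ans₂ := ans ++ [r]
      if r = 0 then ans₂ else altLoop n leaves (some i) ans₂ rest

def findRequestsInQueue_alt (wait : List Int) : List Int :=
  let n := (wait.length : Int)
  let leaves := PySem.List.sorted
    ((PySem.List.enumerate wait 0).map (fun p => min (p.1 + 1) p.2)) (fun x => x) false
  altLoop n leaves none [n] (PySem.List.enumerate wait 0)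

-- ===== PRECONDITION & SPEC =====
-- Pre_ excludes only the empty list, on which A falls through its loop and returns None instead of a list.
def Pre_findRequestsInQueue (wait : List Int) : Prop := wait ≠ []
instance (wait : List Int) : Decidable (Pre_findRequestsInQueue wait) := by
  unfold Pre_findRequestsInQueue; infer_instance

def pvWitness_findRequestsInQueue : List Int := [3, 1, 4]

def Spec_findRequestsInQueue (wait : List Int) (out : List Int) : Prop := out = findRequestsInQueue_alt wait
instance (wait : List Int) (out : List Int) : Decidable (Spec_findRequestsInQueue wait out) := by
  unfold Spec_findRequestsInQueue; infer_instance

-- ===== CLAIM (what is proved, stated in full; the proofs are below) =====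
def Claim_equal_findRequestsInQueue : Prop := ∀ (wait : List Int), Dom_findRequestsInQueue wait → Pre_findRequestsInQueue wait → Spec_findRequestsInQueue wait (findRequestsInQueue wait)

-- ===== LEMMAS AND PROOFS =====

-- proof-only definitions: the filled heap, departure times, and the count of departed jobs
def fillHeap (wait : List Int) : List (Int × Int) :=
  (PySem.List.enumerate wait 0).foldl (fun h q => heapPush h (q.2, q.1)) []

def leaveAt (wait : List Int) (j : Nat) : Int := min ((j : Int) + 1) (wait.getD j 0)

def cnt (wait : List Int) (t : Int) : Nat :=
  (List.range wait.length).countP (fun j => decide (leaveAt wait j ≤ t))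

lemma mem_heapPush {h : List (Int × Int)} {x p : Int × Int} :
    p ∈ heapPush h x ↔ p = x ∨ p ∈ h := by
  induction h with
  | nil => simp [heapPush]
  | cons y ys ih =>
    simp only [heapPush]
    split_ifs with hc
    · simp
    · simp [ih]; tauto

lemma mem_foldl_heapPush {l : List (Int × Int)} :
    ∀ {acc : List (Int × Int)} {p : Int × Int},
    p ∈ l.foldl (fun h q => heapPush h (q.2, q.1)) acc ↔ p ∈ acc ∨ ∃ q ∈ l, p = (q.2, q.1) := by
  induction l with
  | nil => simp
  | cons y ys ih =>
    intro acc p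
    simp only [List.foldl_cons, ih, mem_heapPush]
    simp; tauto

lemma mem_fillHeap {wait : List Int} {p : Int × Int} :
    p ∈ fillHeap wait ↔ ∃ jn : Nat, jn < wait.length ∧ p = (wait.getD jn 0, (jn : Int)) := by
  simp only [fillHeap, mem_foldl_heapPush, List.not_mem_nil, false_or]
  constructor
  · rintro ⟨q, hq, rfl⟩
    rw [PySem.List.mem_enumerate_iff] at hq
    obtain ⟨k, hk, rfl⟩ := hq
    exact ⟨k, hk, by simp [List.getElem?_eq_getElem hk]⟩
  · rintro ⟨jn, hjn, rfl⟩
    refine ⟨((jn : Int), wait[jn]), ?_, by simp [List.getElem?_eq_getElem hjn]⟩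
    rw [PySem.List.mem_enumerate_iff]
    exact ⟨jn, hjn, by simp⟩

lemma pairwise_fst_heapPush {h : List (Int × Int)} {x : Int × Int}
    (hh : h.Pairwise (fun a b => a.1 ≤ b.1)) :
    (heapPush h x).Pairwise (fun a b => a.1 ≤ b.1) := by
  induction h with
  | nil => simp [heapPush]
  | cons y ys ih =>
    simp only [heapPush]
    rw [List.pairwise_cons] at hh
    split_ifs with hc
    · refine List.pairwise_cons.mpr ⟨?_, List.pairwise_cons.mpr hh⟩
      intro z hz
      rcases List.mem_cons.mp hz with rfl | hz
      · rcases hc with h1 | ⟨h1, _⟩ <;> omega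
      · have := hh.1 z hz
        rcases hc with h1 | ⟨h1, _⟩ <;> omega
    · refine List.pairwise_cons.mpr ⟨?_, ih hh.2⟩
      intro z hz
      rcases mem_heapPush.mp hz with rfl | hz
      · rw [not_or, not_and_or] at hc; omega
      · exact hh.1 z hz

lemma pairwise_fst_fillHeap (wait : List Int) :
    (fillHeap wait).Pairwise (fun a b => a.1 ≤ b.1) := by
  rw [fillHeap]
  generalize PySem.List.enumerate wait 0 = l
  have : ∀ (l : List (Int × Int)) (acc : List (Int × Int)),
      acc.Pairwise (fun a b => a.1 ≤ b.1) →
      (l.foldl (fun h q => heapPush h (q.2, q.1)) acc).Pairwise (fun a b => a.1 ≤ b.1) := by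
    intro l
    induction l with
    | nil => intro acc h; simpa using h
    | cons y ys ih => intro acc h; exact ih _ (pairwise_fst_heapPush h)
  exact this l [] (by simp)

lemma countP_range_add {n jn : Nat} {p q : Nat → Bool} (hjn : jn < n) (hp : p jn = false)
    (hq : q jn = true) (hagree : ∀ j, j ≠ jn → q j = p j) :
    (List.range n).countP q = (List.range n).countP p + 1 := by
  induction n with
  | zero => omega
  | succ m ih =>
    rw [List.range_succ, List.countP_append, List.countP_append]
    by_cases h : jn = m
    · subst h
      have h1 : List.countP q (List.range jn) = List.countP p (List.range jn) := by
        apply List.countP_congr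
        intro a ha
        simp only [List.mem_range] at ha
        rw [hagree a (by omega)]
      rw [h1]
      simp [hp, hq]
    · rw [ih (by omega)]
      have := hagree m (by omega)
      simp [List.countP_cons, this]
      omega


lemma popGen (wait : List Int) (T : Int) :
    ∀ (hp : List (Int × Int)) (rm : PySem.Set Int) (c : Int),
    hp.Pairwise (fun a b => a.1 ≤ b.1) →
    (∀ p ∈ hp, ∃ jn : Nat, jn < wait.length ∧ p = (wait.getD jn 0, (jn : Int))) →
    (∀ jn : Nat, jn < wait.length → wait.getD jn 0 ≤ T →
      ((jn : Int) ∈ rm ∨ (wait.getD jn 0, (jn : Int)) ∈ hp)) →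
    (∀ jn : Nat, jn < wait.length → (jn : Int) ∈ rm → leaveAt wait jn ≤ T) →
    (∀ jn : Nat, jn < wait.length → (jn : Int) + 1 ≤ T → T < wait.getD jn 0 → (jn : Int) ∈ rm) →
    c = ((List.range wait.length).countP (fun j : Nat => decide ((j : Int) ∈ rm)) : Int) →
    (∀ jn : Nat, jn < wait.length →
        ((jn : Int) ∈ (popExpired (wait.length : Int) T hp rm c).2.1 ↔ leaveAt wait jn ≤ T)) ∧
    (popExpired (wait.length : Int) T hp rm c).2.2 = (cnt wait T : Int) ∧
    (cnt wait T < wait.length → (popExpired (wait.length : Int) T hp rm c).1 =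
      hp.filter (fun p => decide (T < p.1))) := by
  intro hp
  induction hp with
  | nil =>
    intro rm c hG1 hG2 hG3 hG4 hG5 hG6
    by_cases hcn : c < (wait.length : Int)
    · have hE : popExpired (wait.length : Int) T [] rm c = ([], rm, c) := by
        rw [popExpired]; simp [hcn]
      rw [hE]
      have hD1 : ∀ jn : Nat, jn < wait.length → ((jn : Int) ∈ rm ↔ leaveAt wait jn ≤ T) := by
        intro jn hjn
        constructor
        · exact hG4 jn hjn
        · intro hle
          by_cases hw : wait.getD jn 0 ≤ T
          · rcases hG3 jn hjn hw with h | h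
            · exact h
            · simp at h
          · rw [leaveAt, min_le_iff] at hle
            exact hG5 jn hjn (by omega) (by omega)
      refine ⟨hD1, ?_, by simp⟩
      show c = (cnt wait T : Int)
      rw [hG6, cnt]
      congr 1
      apply List.countP_congr
      intro j hj
      simp only [decide_eq_true_eq]
      exact hD1 j (List.mem_range.mp hj)
    · -- c = length: everything already removed
      have hcountle : (List.range wait.length).countP (fun j : Nat => decide ((j : Int) ∈ rm)) ≤
          wait.length := le_trans List.countP_le_length (le_of_eq (List.length_range))
      have hcle : c ≤ (wait.length : Int) := by rw [hG6]; exact_mod_cast hcountle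
      have hceq : (List.range wait.length).countP (fun j : Nat => decide ((j : Int) ∈ rm)) =
          wait.length := by
        have h1 : ((List.range wait.length).countP (fun j : Nat => decide ((j : Int) ∈ rm)) : Int) =
            (wait.length : Int) := by rw [← hG6]; omega
        exact_mod_cast h1
      have hall : ∀ j : Nat, j < wait.length → (j : Int) ∈ rm := by
        intro j hj
        have := (List.countP_eq_length.mp (by rw [hceq, List.length_range])) j
          (List.mem_range.mpr hj)
        simpa using this
      have hE : popExpired (wait.length : Int) T [] rm c = ([], rm, c) := by
        rw [popExpired]; simp [hcn]
      rw [hE]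
      have hD1 : ∀ jn : Nat, jn < wait.length → ((jn : Int) ∈ rm ↔ leaveAt wait jn ≤ T) := by
        intro jn hjn
        exact iff_of_true (hall jn hjn) (hG4 jn hjn (hall jn hjn))
      have hcnt : cnt wait T = wait.length := by
        rw [cnt]
        refine (List.countP_eq_length.mpr ?_).trans List.length_range
        intro j hj
        simp only [decide_eq_true_eq]
        exact hG4 j (List.mem_range.mp hj) (hall j (List.mem_range.mp hj))
      refine ⟨hD1, ?_, fun h => by omega⟩
      show c = (cnt wait T : Int)
      rw [hcnt]; omega
  | cons hd rest ih =>
    intro rm c hG1 hG2 hG3 hG4 hG5 hG6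
    obtain ⟨v, idx⟩ := hd
    obtain ⟨j0, hj0, hpair⟩ := hG2 (v, idx) (List.mem_cons_self)
    have hv : v = wait.getD j0 0 := congrArg Prod.fst hpair
    have hidx : idx = (j0 : Int) := congrArg Prod.snd hpair
    by_cases hcn : c < (wait.length : Int)
    case neg =>
      -- identical to the nil c = length case: nothing is popped
      have hcountle : (List.range wait.length).countP (fun j : Nat => decide ((j : Int) ∈ rm)) ≤
          wait.length := le_trans List.countP_le_length (le_of_eq (List.length_range))
      have hceq : (List.range wait.length).countP (fun j : Nat => decide ((j : Int) ∈ rm)) =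
          wait.length := by
        have h1 : ((List.range wait.length).countP (fun j : Nat => decide ((j : Int) ∈ rm)) : Int) =
            (wait.length : Int) := by rw [← hG6]; omega
        exact_mod_cast h1
      have hall : ∀ j : Nat, j < wait.length → (j : Int) ∈ rm := by
        intro j hj
        have := (List.countP_eq_length.mp (by rw [hceq, List.length_range])) j
          (List.mem_range.mpr hj)
        simpa using this
      have hE : popExpired (wait.length : Int) T ((v, idx) :: rest) rm c =
          ((v, idx) :: rest, rm, c) := by
        rw [popExpired]; simp [hcn]
      rw [hE]
      have hD1 : ∀ jn : Nat, jn < wait.length → ((jn : Int) ∈ rm ↔ leaveAt wait jn ≤ T) := by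
        intro jn hjn
        exact iff_of_true (hall jn hjn) (hG4 jn hjn (hall jn hjn))
      have hcnt : cnt wait T = wait.length := by
        rw [cnt]
        refine (List.countP_eq_length.mpr ?_).trans List.length_range
        intro j hj
        simp only [decide_eq_true_eq]
        exact hG4 j (List.mem_range.mp hj) (hall j (List.mem_range.mp hj))
      refine ⟨hD1, ?_, fun h => by omega⟩
      show c = (cnt wait T : Int)
      rw [hcnt]; omega
    case pos =>
      by_cases hvT : v ≤ T
      · by_cases hmem : PySem.Set.contains rm idx = true
        · have hE : popExpired (wait.length : Int) T ((v, idx) :: rest) rm c =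
              popExpired (wait.length : Int) T rest rm c := by
            rw [popExpired]; simp [hcn, hvT, hmem]
            intro h; exact absurd ((PySem.Set.contains_iff rm idx).mp hmem) h
          rw [hE]
          have hrm : idx ∈ rm := (PySem.Set.contains_iff rm idx).mp hmem
          have hres := ih rm c (hG1.of_cons)
            (fun p hp => hG2 p (List.mem_cons_of_mem _ hp))
            (by
              intro jn h1 h2
              rcases hG3 jn h1 h2 with h | h
              · exact Or.inl h
              · rcases List.mem_cons.mp h with h | h
                · have : (jn : Int) = idx := congrArg Prod.snd h
                  exact Or.inl (this ▸ hrm)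
                · exact Or.inr h)
            hG4 hG5 hG6
          refine ⟨hres.1, hres.2.1, ?_⟩
          intro hlt
          rw [hres.2.2 hlt, List.filter_cons]
          simp [show ¬ T < v by omega]
        · have hE : popExpired (wait.length : Int) T ((v, idx) :: rest) rm c =
              popExpired (wait.length : Int) T rest (PySem.Set.add rm idx) (c + 1) := by
            rw [popExpired]; simp [hcn, hvT, hmem]
            intro h; exact absurd ((PySem.Set.contains_iff rm idx).mpr h) hmem
          rw [hE]
          have hnrm : idx ∉ rm := fun h => hmem ((PySem.Set.contains_iff rm idx).mpr h)
          have hres := ih (PySem.Set.add rm idx) (c + 1) (hG1.of_cons)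
            (fun p hp => hG2 p (List.mem_cons_of_mem _ hp))
            (by
              intro jn h1 h2
              rcases hG3 jn h1 h2 with h | h
              · exact Or.inl ((PySem.Set.mem_add _ _ _).mpr (Or.inl h))
              · rcases List.mem_cons.mp h with h | h
                · have : (jn : Int) = idx := congrArg Prod.snd h
                  exact Or.inl ((PySem.Set.mem_add _ _ _).mpr (Or.inr this))
                · exact Or.inr h)
            (by
              intro jn h1 h2
              rcases (PySem.Set.mem_add _ _ _).mp h2 with h | h
              · exact hG4 jn h1 h
              · have : jn = j0 := by
                  have := h.trans hidx
                  exact_mod_cast this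
                subst this
                rw [leaveAt]
                have : wait.getD jn 0 = v := hv.symm
                rw [this]
                omega)
            (fun jn h1 h2 h3 => (PySem.Set.mem_add _ _ _).mpr (Or.inl (hG5 jn h1 h2 h3)))
            (by
              have hcp : (List.range wait.length).countP
                  (fun j : Nat => decide ((j : Int) ∈ PySem.Set.add rm idx)) =
                  (List.range wait.length).countP (fun j : Nat => decide ((j : Int) ∈ rm)) + 1 := by
                apply countP_range_add (jn := j0) hj0
                · simp only [decide_eq_false_iff_not]
                  rw [← hidx]; exact hnrm
                · simp only [decide_eq_true_eq]
                  exact (PySem.Set.mem_add _ _ _).mpr (Or.inr hidx.symm)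
                · intro j hne
                  have : ((j : Int) ∈ PySem.Set.add rm idx) ↔ ((j : Int) ∈ rm) := by
                    rw [PySem.Set.mem_add _ _ _]
                    constructor
                    · rintro (h | h)
                      · exact h
                      · exfalso; apply hne; rw [hidx] at h; exact_mod_cast h
                    · exact Or.inl
                  simp [this]
              rw [hcp, hG6]
              push_cast
              ring)
          refine ⟨hres.1, hres.2.1, ?_⟩
          intro hlt
          rw [hres.2.2 hlt, List.filter_cons]
          simp [show ¬ T < v by omega]
      · -- head not expired: loop stops
        have hE : popExpired (wait.length : Int) T ((v, idx) :: rest) rm c =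
            ((v, idx) :: rest, rm, c) := by
          rw [popExpired]; simp [hcn, hvT]
        rw [hE]
        have hrest : ∀ b ∈ rest, v ≤ b.1 := (List.pairwise_cons.mp hG1).1
        have hD1 : ∀ jn : Nat, jn < wait.length → ((jn : Int) ∈ rm ↔ leaveAt wait jn ≤ T) := by
          intro jn hjn
          constructor
          · exact hG4 jn hjn
          · intro hle
            by_cases hw : wait.getD jn 0 ≤ T
            · rcases hG3 jn hjn hw with h | h
              · exact h
              · exfalso
                rcases List.mem_cons.mp h with h | h
                · have : wait.getD jn 0 = v := congrArg Prod.fst h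
                  omega
                · have := hrest _ h
                  simp only at this
                  omega
            · rw [leaveAt, min_le_iff] at hle
              exact hG5 jn hjn (by omega) (by omega)
        refine ⟨hD1, ?_, ?_⟩
        · show c = (cnt wait T : Int)
          rw [hG6, cnt]
          congr 1
          apply List.countP_congr
          intro j hj
          simp only [decide_eq_true_eq]
          exact hD1 j (List.mem_range.mp hj)
        · intro hlt
          symm
          apply List.filter_eq_self.mpr
          intro p hm
          simp only [decide_eq_true_eq]
          rcases List.mem_cons.mp hm with h | h
          · subst h; simp only; omega
          · have := hrest _ h; omega

def leaveList (wait : List Int) : List Int :=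
  (PySem.List.enumerate wait 0).map (fun p => min (p.1 + 1) p.2)

def sortedLeaves (wait : List Int) : List Int :=
  PySem.List.sorted (leaveList wait) (fun x => x) false

lemma leaveList_eq (wait : List Int) :
    leaveList wait = (List.range wait.length).map (fun j => leaveAt wait j) := by
  apply List.ext_getElem
  · simp [leaveList, PySem.List.length_enumerate]
  · intro k h1 h2
    simp only [leaveList, List.getElem_map, PySem.List.getElem_enumerate, List.getElem_range]
    have hk : k < wait.length := by simpa [leaveList, PySem.List.length_enumerate] using h1
    rw [leaveAt, List.getD_eq_getElem _ _ hk]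
    norm_num

lemma bisect_cnt (wait : List Int) (T : Int) :
    PySem.List.bisectRight (sortedLeaves wait) T = cnt wait T := by
  have hpw : (sortedLeaves wait).Pairwise (fun a b => a ≤ b) :=
    PySem.List.sorted_pairwise (leaveList wait) (fun x => x)
  obtain ⟨hble, hlo, hhi⟩ := PySem.List.bisectRight_spec (sortedLeaves wait) T hpw
  have hcount : (sortedLeaves wait).countP (fun x => decide (x ≤ T)) =
      PySem.List.bisectRight (sortedLeaves wait) T := by
    set s := sortedLeaves wait
    set b := PySem.List.bisectRight s T
    conv_lhs => rw [← List.take_append_drop b s]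
    rw [List.countP_append]
    have h1 : (s.take b).countP (fun x => decide (x ≤ T)) = (s.take b).length := by
      apply List.countP_eq_length.mpr
      intro a ha
      rw [List.mem_iff_getElem] at ha
      obtain ⟨j, hj, rfl⟩ := ha
      have hjb : j < b := by simp [List.length_take] at hj; omega
      have hjs : j < s.length := by simp [List.length_take] at hj; omega
      rw [List.getElem_take]
      simp only [decide_eq_true_eq]
      exact hlo j hjs hjb
    have h2 : (s.drop b).countP (fun x => decide (x ≤ T)) = 0 := by
      apply List.countP_eq_zero.mpr
      intro a ha
      rw [List.mem_iff_getElem] at ha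
      obtain ⟨j, hj, rfl⟩ := ha
      rw [List.getElem_drop]
      simp only [decide_eq_true_eq, not_le]
      exact hhi (b + j) (by simp [List.length_drop] at hj; omega) (by omega)
    rw [h1, h2, List.length_take]
    omega
  have hperm : (sortedLeaves wait).Perm (leaveList wait) :=
    PySem.List.sorted_perm (leaveList wait) (fun x => x) false
  rw [← hcount, hperm.countP_eq, leaveList_eq, List.countP_map, cnt]
  rfl

lemma record (wait : List Int) (l : Int) (i : Nat) (rm : PySem.Set Int) (c : Int)
    (hl : l + 1 ≤ (i : Int)) (hi : i < wait.length)
    (H2 : ∀ jn : Nat, jn < wait.length → ((jn : Int) ∈ rm ↔ leaveAt wait jn ≤ l + 1))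
    (H6 : c = ((List.range wait.length).countP (fun j : Nat => decide ((j : Int) ∈ rm)) : Int))
    (H5 : ∀ jn : Nat, jn < wait.length → l < (jn : Int) → jn < i → wait.getD jn 0 ≤ l + 1)
    (hrec : ¬ wait.getD i 0 ≤ l + 1) :
    (∀ jn : Nat, jn < wait.length →
      ((jn : Int) ∈ (popExpired (wait.length : Int) ((i : Int) + 1)
          ((fillHeap wait).filter (fun p => decide (l + 1 < p.1)))
          (PySem.Set.add rm (i : Int)) (c + 1)).2.1 ↔ leaveAt wait jn ≤ (i : Int) + 1)) ∧
    (popExpired (wait.length : Int) ((i : Int) + 1)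
        ((fillHeap wait).filter (fun p => decide (l + 1 < p.1)))
        (PySem.Set.add rm (i : Int)) (c + 1)).2.2 = (cnt wait ((i : Int) + 1) : Int) ∧
    (cnt wait ((i : Int) + 1) < wait.length →
      (popExpired (wait.length : Int) ((i : Int) + 1)
          ((fillHeap wait).filter (fun p => decide (l + 1 < p.1)))
          (PySem.Set.add rm (i : Int)) (c + 1)).1 =
        (fillHeap wait).filter (fun p => decide ((i : Int) + 1 < p.1))) := by
  have hres := popGen wait ((i : Int) + 1)
    ((fillHeap wait).filter (fun p => decide (l + 1 < p.1)))
    (PySem.Set.add rm (i : Int)) (c + 1)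
    ((pairwise_fst_fillHeap wait).filter _)
    (fun p hp => mem_fillHeap.mp (List.mem_of_mem_filter hp))
    (by
      intro jn h1 h2
      by_cases hl2 : leaveAt wait jn ≤ l + 1
      · exact Or.inl ((PySem.Set.mem_add _ _ _).mpr (Or.inl ((H2 jn h1).mpr hl2)))
      · right
        rw [List.mem_filter]
        refine ⟨mem_fillHeap.mpr ⟨jn, h1, rfl⟩, ?_⟩
        rw [leaveAt, min_le_iff] at hl2
        simp only [decide_eq_true_eq]
        omega)
    (by
      intro jn h1 hm
      rcases (PySem.Set.mem_add _ _ _).mp hm with h | h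
      · have := (H2 jn h1).mp h
        omega
      · have hji : jn = i := by exact_mod_cast h
        subst hji
        rw [leaveAt]
        have := min_le_left ((jn : Int) + 1) (wait.getD jn 0)
        omega)
    (by
      intro jn h1 h2 h3
      by_cases hji : jn = i
      · exact (PySem.Set.mem_add _ _ _).mpr (Or.inr (by rw [hji]))
      · have hjlt : jn < i := by
          have : (jn : Int) ≤ (i : Int) := by omega
          have : jn ≤ i := by exact_mod_cast this
          omega
        apply (PySem.Set.mem_add _ _ _).mpr
        left
        apply (H2 jn h1).mpr
        by_cases hle : (jn : Int) ≤ l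
        · rw [leaveAt, min_le_iff]; left; omega
        · have := H5 jn h1 (by omega) hjlt
          omega)
    (by
      have hnotmem : (i : Int) ∉ rm := by
        intro h
        have := (H2 i hi).mp h
        rw [leaveAt, min_le_iff] at this
        omega
      have hcp : (List.range wait.length).countP
          (fun j : Nat => decide ((j : Int) ∈ PySem.Set.add rm (i : Int))) =
          (List.range wait.length).countP (fun j : Nat => decide ((j : Int) ∈ rm)) + 1 := by
        apply countP_range_add (jn := i) hi
        · simp only [decide_eq_false_iff_not]
          exact hnotmem
        · simp only [decide_eq_true_eq]
          exact (PySem.Set.mem_add _ _ _).mpr (Or.inr rfl)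
        · intro j hne
          have : ((j : Int) ∈ PySem.Set.add rm (i : Int)) ↔ ((j : Int) ∈ rm) := by
            rw [PySem.Set.mem_add _ _ _]
            constructor
            · rintro (h | h)
              · exact h
              · exfalso; apply hne; exact_mod_cast h
            · exact Or.inl
          simp [this]
      rw [hcp, H6]
      push_cast
      ring)
  refine ⟨hres.1, hres.2.1, ?_⟩
  intro hlt
  rw [hres.2.2 hlt, List.filter_filter]
  apply List.filter_congr
  intro x _
  by_cases hx : (i : Int) + 1 < x.1
  · simp only [hx, decide_true, Bool.true_and]
    simp only [decide_eq_true_eq]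
    omega
  · simp [hx]

lemma main (wait : List Int) :
    ∀ (k i : Nat) (l : Int) (rm : PySem.Set Int) (c : Int) (ans : List Int),
    i + k = wait.length →
    l + 1 ≤ (i : Int) →
    (∀ jn : Nat, jn < wait.length → ((jn : Int) ∈ rm ↔ leaveAt wait jn ≤ l + 1)) →
    c = ((List.range wait.length).countP (fun j : Nat => decide ((j : Int) ∈ rm)) : Int) →
    (∀ jn : Nat, jn < wait.length → l < (jn : Int) → jn < i → wait.getD jn 0 ≤ l + 1) →
    aLoop (wait.length : Int) k (i : Int)
        ((fillHeap wait).filter (fun p => decide (l + 1 < p.1))) rm c ans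
      = altLoop (wait.length : Int) (sortedLeaves wait) (some l) ans
        (PySem.List.enumerate (wait.drop i) (i : Int)) := by
  intro k
  induction k with
  | zero =>
    intro i l rm c ans hik hl H2 H6 H5
    have hdrop : wait.drop i = [] := List.drop_eq_nil_iff.mpr (by omega)
    rw [hdrop, PySem.List.enumerate_nil]
    rfl
  | succ k ih =>
    intro i l rm c ans hik hl H2 H6 H5
    have hi : i < wait.length := by omega
    have hdrop : wait.drop i = wait[i] :: wait.drop (i + 1) := List.drop_eq_getElem_cons hi
    rw [hdrop, PySem.List.enumerate_cons]
    have hget : wait.getD i 0 = wait[i] := List.getD_eq_getElem _ _ hi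
    by_cases hskip : wait.getD i 0 ≤ l + 1
    · -- skipped step: i was lazily removed before
      have hm : (i : Int) ∈ rm := (H2 i hi).mpr (by rw [leaveAt, min_le_iff]; right; exact hskip)
      have hc : PySem.Set.contains rm (i : Int) = true := (PySem.Set.contains_iff _ _).mpr hm
      have hw : decide (wait[i] ≤ l + 1) = true := by
        simp only [decide_eq_true_eq]; rw [← hget]; exact hskip
      simp only [aLoop, hc, if_true, altLoop, hw]
      have := ih (i + 1) l rm c ans (by omega) (by push_cast; omega) H2 H6
        (by
          intro jn h1 h2 h3
          by_cases hj : jn = i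
          · subst hj; exact hskip
          · exact H5 jn h1 h2 (by omega))
      rw [show ((i : Int) + 1) = ((i + 1 : Nat) : Int) by push_cast; ring]
      exact this
    · -- recorded step
      have hnm : (i : Int) ∉ rm := fun h => by
        have := (H2 i hi).mp h
        rw [leaveAt, min_le_iff] at this
        omega
      have hc : PySem.Set.contains rm (i : Int) = false := by
        rw [← Bool.not_eq_true]
        exact fun h => hnm ((PySem.Set.contains_iff _ _).mp h)
      have hw : decide (wait[i] ≤ l + 1) = false := by
        simp only [decide_eq_false_iff_not]; rw [← hget]; exact hskip
      obtain ⟨R1, R2, R3⟩ := record wait l i rm c hl hi H2 H6 H5 hskip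
      simp only [aLoop, hc, Bool.false_eq_true, if_false, altLoop, hw]
      rw [R2]
      have hb : ((PySem.List.bisectRight (sortedLeaves wait) ((i : Int) + 1) : Nat) : Int) =
          (cnt wait ((i : Int) + 1) : Int) := by
        exact_mod_cast bisect_cnt wait ((i : Int) + 1)
      rw [hb]
      have hcle : cnt wait ((i : Int) + 1) ≤ wait.length :=
        le_trans List.countP_le_length (le_of_eq List.length_range)
      by_cases hz : (wait.length : Int) - (cnt wait ((i : Int) + 1) : Int) = 0
      · rw [if_pos (by rw [PySem.List.pyGet?_neg_one_append_singleton]; simp [hz]),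
          if_pos hz]
      · have hcnlt : cnt wait ((i : Int) + 1) < wait.length := by omega
        rw [if_neg (by rw [PySem.List.pyGet?_neg_one_append_singleton]; simp [hz]),
          if_neg hz]
        rw [R3 hcnlt]
        have := ih (i + 1) (i : Int)
          (popExpired (wait.length : Int) ((i : Int) + 1)
            ((fillHeap wait).filter (fun p => decide (l + 1 < p.1)))
            (PySem.Set.add rm (i : Int)) (c + 1)).2.1
          (cnt wait ((i : Int) + 1) : Int)
          (ans ++ [(wait.length : Int) - (cnt wait ((i : Int) + 1) : Int)])
          (by omega) (by push_cast; omega) R1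
          (by
            rw [cnt]
            congr 1
            symm
            apply List.countP_congr
            intro j hj
            simp only [decide_eq_true_eq]
            exact R1 j (List.mem_range.mp hj))
          (by intro jn h1 h2 h3; omega)
        rw [show ((i : Int) + 1) = ((i + 1 : Nat) : Int) by push_cast; ring]
        exact this

lemma bridge_findRequestsInQueue (wait : List Int) (hDom : (wait.all pvDomInt) = true) (hne : wait ≠ []) :
    aLoop (wait.length : Int) wait.length 0 (fillHeap wait) PySem.Set.empty 0
        [(wait.length : Int)]
      = altLoop (wait.length : Int) (sortedLeaves wait) none [(wait.length : Int)]
        (PySem.List.enumerate wait 0) := by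
  have hn : 0 < wait.length := List.length_pos_iff.mpr hne
  obtain ⟨k, hk⟩ : ∃ k, wait.length = k + 1 := ⟨wait.length - 1, by omega⟩
  have hbound : ∀ x ∈ wait, -2147483648 ≤ x ∧ x ≤ 2147483648 := by
    intro x hx
    have := List.all_eq_true.mp hDom x hx
    simpa [pvDomInt] using this
  have hgd : ∀ jn : Nat, jn < wait.length → -2147483648 ≤ wait.getD jn 0 := by
    intro jn hjn
    rw [List.getD_eq_getElem _ _ hjn]
    exact (hbound _ (List.getElem_mem hjn)).1
  have hfill : (fillHeap wait).filter (fun p => decide ((-2147483650 : Int) + 1 < p.1)) =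
      fillHeap wait := by
    apply List.filter_eq_self.mpr
    intro p hp
    obtain ⟨jn, hjn, rfl⟩ := mem_fillHeap.mp hp
    simp only [decide_eq_true_eq]
    have := hgd jn hjn
    omega
  have H2₀ : ∀ jn : Nat, jn < wait.length →
      ((jn : Int) ∈ PySem.Set.empty ↔ leaveAt wait jn ≤ (-2147483650 : Int) + 1) := by
    intro jn hjn
    constructor
    · intro h; exact absurd h (List.not_mem_nil)
    · intro h
      rw [leaveAt, min_le_iff] at h
      have := hgd jn hjn
      omega
  have H5₀ : ∀ jn : Nat, jn < wait.length → (-2147483650 : Int) < (jn : Int) → jn < 0 →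
      wait.getD jn 0 ≤ (-2147483650 : Int) + 1 := by
    intro jn _ _ h; omega
  have hrec₀ : ¬ wait.getD 0 0 ≤ (-2147483650 : Int) + 1 := by
    have := hgd 0 hn
    omega
  obtain ⟨R1, R2, R3⟩ := record wait (-2147483650 : Int) 0 PySem.Set.empty 0 (by norm_num) hn
    H2₀ (by simp) H5₀ hrec₀
  simp only [Nat.cast_zero, hfill, zero_add] at R1 R2 R3
  -- one step of A
  rw [hk]
  have hcE : PySem.Set.contains PySem.Set.empty (0 : Int) = false := rfl
  simp only [aLoop, hcE, Bool.false_eq_true, if_false]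
  simp only [zero_add]
  rw [hk] at R1 R2 R3
  -- one step of B
  have hB : PySem.List.enumerate wait 0 = ((0 : Int), wait[0]'hn) ::
      PySem.List.enumerate (wait.drop 1) 1 := by
    conv_lhs => rw [show wait = wait[0]'hn :: wait.drop 1 by
      rw [← List.drop_eq_getElem_cons hn, List.drop_zero]]
    rw [PySem.List.enumerate_cons]
    norm_num
  rw [hB]
  simp only [altLoop, Bool.false_eq_true, if_false, zero_add]
  rw [R2]
  have hb1 : ((PySem.List.bisectRight (sortedLeaves wait) 1 : Nat) : Int) =
      (cnt wait 1 : Int) := by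
    exact_mod_cast bisect_cnt wait 1
  rw [hb1]
  have hcle : cnt wait 1 ≤ wait.length :=
    le_trans List.countP_le_length (le_of_eq List.length_range)
  rw [hk] at hcle
  by_cases hz : ((k + 1 : Nat) : Int) - (cnt wait 1 : Int) = 0
  · rw [if_pos (by rw [PySem.List.pyGet?_neg_one_append_singleton]; exact congrArg some hz),
      if_pos hz]
  · have hcnlt : cnt wait 1 < k + 1 := by omega
    rw [if_neg (by rw [PySem.List.pyGet?_neg_one_append_singleton]; intro h; exact hz (Option.some.inj h)),
      if_neg hz]
    rw [R3 (by rw [← hk] at hcnlt ⊢; exact hcnlt)]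
    have hmain := main wait k 1 0
      (popExpired ((k + 1 : Nat) : Int) 1 (fillHeap wait)
        (PySem.Set.add PySem.Set.empty 0) (0 + 1)).2.1
      (cnt wait 1 : Int)
      ([((k + 1 : Nat) : Int)] ++ [((k + 1 : Nat) : Int) - (cnt wait 1 : Int)])
      (by omega) (by norm_num)
      (by
        intro jn hjn
        rw [show (0 : Int) + 1 = 1 by norm_num]
        exact R1 jn (by omega))
      (by
        rw [cnt]
        congr 1
        symm
        apply List.countP_congr
        intro j hj
        simp only [decide_eq_true_eq]
        exact R1 j (by have := List.mem_range.mp hj; omega))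
      (by intro jn h1 h2 h3; omega)
    rw [hk] at hmain
    rw [show ((1 : Nat) : Int) = (1 : Int) from rfl] at hmain
    rw [show (fillHeap wait).filter (fun p => decide ((0 : Int) + 1 < p.1)) =
      (fillHeap wait).filter (fun p => decide ((1 : Int) < p.1)) by norm_num] at hmain
    exact hmain

-- ===== VERDICT (by name: the statement is the Claim_ definition above) =====
theorem findRequestsInQueue_spec : Claim_equal_findRequestsInQueue := by
  intro wait hDom hPre
  show findRequestsInQueue wait = findRequestsInQueue_alt wait
  show aLoop (wait.length : Int) wait.length 0 (fillHeap wait) PySem.Set.empty 0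
      [(wait.length : Int)]
    = altLoop (wait.length : Int) (sortedLeaves wait) none [(wait.length : Int)]
      (PySem.List.enumerate wait 0)
  exact bridge_findRequestsInQueue wait hDom hPre
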